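-- pv_equiv track=rewrite | github.com/Mushfiqur-Rahman-Robin/leetcode-practice | scrapbook/bfs_dfs.py | dfs_tree_iterative
-- ===== SOURCE A (Python) =====
-- def dfs_tree_iterative(node):
--     """
--     Perform DFS traversal on a binary tree represented as a list (iterative approach).
--
--     Args:
--     - node (List): Binary tree represented as a list.
--
--     Returns:
--     - List: DFS traversal of the tree.
--     """
--     if not node:  # Check for an empty tree
--         return []
--
--     stack = [0]  # Start DFS from the root at index 0
--     traversal = []  # Store the DFS traversal
--
--     while stack:
--         index = stack.pop()
--
--         # Only process nodes that are not None
--         if node[index] is not None: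
--             traversal.append(node[index])
--
--             # Push right child first so that left child is processed first
--             right = 2 * index + 2
--             left = 2 * index + 1
--
--             if right < len(node):
--                 stack.append(right)
--             if left < len(node):
--                 stack.append(left)
--
--     return traversal
-- ===== SOURCE B (Python) =====
-- def dfs_tree_iterative(node):
--     """Recursive preorder DFS over the array-encoded tree (root, left, right)."""
--     if not node:  # Check for an empty tree
--         return []
--     n = len(node)
--     out = []
--
--     def visit(index):
--         if index >= n or node[index] is None:
--             return
--         out.append(node[index])
--         visit(2 * index + 1)
--         visit(2 * index + 2)
--
--     visit(0)
--     return out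
-- ===== Notes on version B (the rewrite author's own statement) =====
-- stated objective: simpler
-- what changed: Replaces the explicit stack loop by a recursive preorder helper (root, then left, then right) using the call stack.
import Mathlib
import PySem

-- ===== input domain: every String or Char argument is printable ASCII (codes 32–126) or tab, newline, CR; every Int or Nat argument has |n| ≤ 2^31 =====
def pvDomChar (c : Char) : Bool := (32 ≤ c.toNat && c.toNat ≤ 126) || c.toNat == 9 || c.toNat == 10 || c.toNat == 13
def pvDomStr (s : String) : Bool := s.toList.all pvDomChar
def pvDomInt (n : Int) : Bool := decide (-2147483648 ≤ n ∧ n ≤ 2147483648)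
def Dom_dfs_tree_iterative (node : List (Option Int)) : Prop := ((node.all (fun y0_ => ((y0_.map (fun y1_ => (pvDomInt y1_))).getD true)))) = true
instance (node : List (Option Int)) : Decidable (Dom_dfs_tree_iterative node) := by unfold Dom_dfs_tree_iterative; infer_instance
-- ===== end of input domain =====

-- B replaces A's explicit-stack loop by a recursive preorder helper (simpler decomposition; same preorder output).


-- ===== PORT A =====
-- the while-stack loop of A; head of `stack` = Python's stack top (list end).
-- The `else` (index out of range) branch is unreachable from dfs_tree_iterative
-- (only in-range indices are ever pushed); Python would raise IndexError there.
def dfsLoopA (node : List (Option Int)) (stack : List Nat) (traversal : List Int) : List Int :=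
  match stack with
  | [] => traversal
  | index :: rest =>
    if h : index < node.length then
      match node[index] with
      | none => dfsLoopA node rest traversal
      | some v =>
        -- push right child first so that left child is processed first
        let s1 := if 2 * index + 2 < node.length then (2 * index + 2) :: rest else rest
        let s2 := if 2 * index + 1 < node.length then (2 * index + 1) :: s1 else s1
        dfsLoopA node s2 (traversal ++ [v])
    else dfsLoopA node rest traversal
termination_by (stack.map (fun i => 2 ^ (node.length - i))).sum
decreasing_by
  · simp only [List.map_cons, List.sum_cons]
    have := Nat.two_pow_pos (node.length - index)
    omega
  · by_cases h2 : 2 * index + 2 < node.length <;>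
      by_cases h1 : 2 * index + 1 < node.length <;>
        simp [h1, h2]
    · -- both children pushed
      have e1 : 2 ^ (node.length - (2 * index + 1)) ≤ 2 ^ (node.length - (index + 1)) :=
        Nat.pow_le_pow_right (by norm_num) (by omega)
      have e2 : 2 ^ (node.length - (2 * index + 2)) < 2 ^ (node.length - (index + 1)) :=
        Nat.pow_lt_pow_right (by norm_num) (by omega)
      have e3 : 2 ^ (node.length - (index + 1)) + 2 ^ (node.length - (index + 1))
          = 2 ^ (node.length - index) := by
        rw [← two_mul, ← pow_succ']
        congr 1
        omega
      omega
    · exact Nat.pow_lt_pow_right (by norm_num) (by omega)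
    · -- only left child pushed
      exact Nat.pow_lt_pow_right (by norm_num) (by omega)
  · simp only [List.map_cons, List.sum_cons]
    have := Nat.two_pow_pos (node.length - index)
    omega

def dfs_tree_iterative (node : List (Option Int)) : List Int :=
  if node = [] then [] else dfsLoopA node [0] []

-- ===== PORT B =====
-- B's recursive preorder `visit`, with `out` as the accumulator it appends to.
def visitB (node : List (Option Int)) (index : Nat) (out : List Int) : List Int :=
  if h : index < node.length then
    match node[index] with
    | none => out
    | some v => visitB node (2 * index + 2) (visitB node (2 * index + 1) (out ++ [v]))
  else out
termination_by node.length - index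
decreasing_by all_goals omega

def dfs_tree_iterative_alt (node : List (Option Int)) : List Int :=
  if node = [] then [] else visitB node 0 []

-- ===== PRECONDITION & SPEC =====
def Spec_dfs_tree_iterative (node : List (Option Int)) (out : List Int) : Prop := out = dfs_tree_iterative_alt node
instance (node : List (Option Int)) (out : List Int) : Decidable (Spec_dfs_tree_iterative node out) := by unfold Spec_dfs_tree_iterative; infer_instance

-- ===== CLAIM (what is proved, stated in full; the proofs are below) =====
def Claim_equal_dfs_tree_iterative : Prop := ∀ (node : List (Option Int)), Dom_dfs_tree_iterative node → Spec_dfs_tree_iterative node (dfs_tree_iterative node)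

-- ===== LEMMAS AND PROOFS =====

-- Popping an index and fully processing its subtree equals one `visitB` call on it.
theorem dfsLoopA_visitB (node : List (Option Int)) :
    ∀ (k i : Nat), node.length - i ≤ k → ∀ (rest : List Nat) (tr : List Int),
      dfsLoopA node (i :: rest) tr = dfsLoopA node rest (visitB node i tr) := by
  intro k
  induction k with
  | zero =>
    intro i hk rest tr
    have hi : ¬ i < node.length := by omega
    rw [dfsLoopA, visitB]
    simp [hi]
  | succ k ih =>
    intro i hk rest tr
    by_cases hi : i < node.length
    · rw [dfsLoopA, visitB]
      simp only [hi, dite_true]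
      cases hv : node[i] with
      | none => rfl
      | some v =>
        simp only
        by_cases h2 : 2 * i + 2 < node.length
        · have h1 : 2 * i + 1 < node.length := by omega
          simp only [h1, h2, if_true]
          rw [ih (2 * i + 1) (by omega), ih (2 * i + 2) (by omega)]
        · simp only [h2, if_false]
          by_cases h1 : 2 * i + 1 < node.length
          · simp only [h1, if_true]
            rw [ih (2 * i + 1) (by omega)]
            congr 1
            -- right child out of range: visitB there is the identity
            conv_rhs => rw [visitB]
            simp [h2]
          · simp only [h1, if_false]
            congr 1
            conv_rhs => rw [visitB]
            simp only [h2, dite_false]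
            conv_rhs => rw [visitB]
            simp [h1]
    · rw [dfsLoopA, visitB]
      simp [hi]

-- ===== VERDICT (by name: the statement is the Claim_ definition above) =====
theorem dfs_tree_iterative_spec : Claim_equal_dfs_tree_iterative := by
  intro node _
  unfold Spec_dfs_tree_iterative dfs_tree_iterative dfs_tree_iterative_alt
  by_cases h : node = []
  · simp [h]
  · simp only [h, if_false]
    rw [dfsLoopA_visitB node node.length 0 (by omega)]
    rw [dfsLoopA]
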